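-- pv_equiv track=rewrite | github.com/Oortonaut/ActiveContext | src/activecontext/skills/schema.py | _is_valid_hyphen_case
-- ===== SOURCE A (Python) =====
-- def _is_valid_hyphen_case(name: str) -> bool:
--     """Check if name is valid hyphen-case.
--
--     Args:
--         name: The name to validate.
--
--     Returns:
--         True if the name is valid hyphen-case.
--     """
--     if not name:
--         return False
--     # Must start and end with alphanumeric
--     if name.startswith("-") or name.endswith("-"):
--         return False
--     # No consecutive hyphens
--     if "--" in name:
--         return False
--     # Only lowercase letters, numbers, and single hyphens
--     return all(char.islower() or char.isdigit() or char == "-" for char in name)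
-- ===== SOURCE B (Python) =====
-- def _is_valid_hyphen_case(name: str) -> bool:
--     """Single pass with previous-character tracking."""
--     if not name:
--         return False
--     prev = "-"  # sentinel: makes a leading hyphen look like a double hyphen
--     for char in name:
--         if not (char.islower() or char.isdigit() or char == "-"):
--             return False
--         if char == "-" and prev == "-":
--             return False
--         prev = char
--     return prev != "-"
-- ===== Notes on version B (the rewrite author's own statement) =====
-- stated objective: alternative
-- what changed: Replaced A's four separate scans (startswith, endswith, double-hyphen substring search, all()) by one pass over the characters that tracks the previous character, using a hyphen sentinel so a leading hyphen and consecutive hyphens fall to the same check and a final prev-not-hyphen test rejects a trailing hyphen.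
import Mathlib
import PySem

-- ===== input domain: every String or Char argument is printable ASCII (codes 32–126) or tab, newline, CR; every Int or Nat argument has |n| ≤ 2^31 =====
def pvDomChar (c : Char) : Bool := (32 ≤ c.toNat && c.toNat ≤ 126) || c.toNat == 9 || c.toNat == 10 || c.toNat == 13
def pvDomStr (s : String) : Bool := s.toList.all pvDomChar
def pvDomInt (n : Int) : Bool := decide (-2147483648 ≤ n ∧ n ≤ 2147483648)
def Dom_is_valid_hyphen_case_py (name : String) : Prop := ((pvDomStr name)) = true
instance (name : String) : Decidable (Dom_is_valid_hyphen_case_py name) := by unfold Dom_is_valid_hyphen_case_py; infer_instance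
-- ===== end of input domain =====

-- B folds A's four scans (startswith, endswith, "--" search, all()) into one pass
-- tracking the previous character (objective: alternative single-pass decomposition).


-- ===== PORT A =====
def is_valid_hyphen_case_py (name : String) : Bool :=
  if name == "" then false
  else if PySem.Str.startswith name "-" || PySem.Str.endswith name "-" then false
  else if PySem.Str.isIn "--" name then false
  else name.toList.all (fun c => PySem.Chars.islower c || PySem.Chars.isdigit c || c == '-')

-- ===== PORT B =====
-- the for-loop of Source B with its running `prev` state, over the character list
def hyphenLoop (prev : Char) : List Char → Bool
  | [] => prev != '-'
  | c :: rest =>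
    if !(PySem.Chars.islower c || PySem.Chars.isdigit c || c == '-') then false
    else if c == '-' && prev == '-' then false
    else hyphenLoop c rest

def is_valid_hyphen_case_py_alt (name : String) : Bool :=
  if name == "" then false
  else hyphenLoop '-' name.toList

-- ===== PRECONDITION & SPEC =====
def Spec_is_valid_hyphen_case_py (name : String) (out : Bool) : Prop := out = is_valid_hyphen_case_py_alt name
instance (name : String) (out : Bool) : Decidable (Spec_is_valid_hyphen_case_py name out) := by unfold Spec_is_valid_hyphen_case_py; infer_instance

-- ===== CLAIM (what is proved, stated in full; the proofs are below) =====
def Claim_equal_is_valid_hyphen_case_py : Prop := ∀ (name : String), Dom_is_valid_hyphen_case_py name → Spec_is_valid_hyphen_case_py name (is_valid_hyphen_case_py name)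

-- ===== LEMMAS AND PROOFS =====

-- "valid character" predicate shared by both programs
def okChar (c : Char) : Bool := PySem.Chars.islower c || PySem.Chars.isdigit c || c == '-'

-- "no two consecutive hyphens" over a character list
def noDD : List Char → Bool
  | a :: b :: r => !(a == '-' && b == '-') && noDD (b :: r)
  | _ => true

theorem noDD_iff : ∀ (l : List Char), noDD l = true ↔ ¬ ['-', '-'] <:+: l := by
  intro l
  match l with
  | [] => simp [noDD]
  | [a] =>
    simp only [noDD, true_iff]
    intro h
    have := h.length_le
    simp at this
  | a :: b :: r =>
    show (!(a == '-' && b == '-') && noDD (b :: r)) = true ↔ _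
    rw [Bool.and_eq_true, Bool.not_eq_true', noDD_iff (b :: r), List.infix_cons_iff]
    constructor
    · rintro ⟨h1, h2⟩ hinf
      rcases List.infix_cons_iff.mp hinf with hp | hi
      · rw [List.cons_prefix_cons, List.cons_prefix_cons] at hp
        obtain ⟨ha, hb, -⟩ := hp
        rw [← ha, ← hb] at h1
        simp at h1
      · exact h2 (List.infix_cons_iff.mp hi)
    · intro h
      refine ⟨?_, fun hx => h (List.infix_cons_iff.mpr (Or.inr (List.infix_cons_iff.mpr hx)))⟩
      by_contra hc
      simp only [Bool.not_eq_false, Bool.and_eq_true, beq_iff_eq] at hc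
      exact h (List.IsPrefix.isInfix ⟨r, by simp [hc.1, hc.2]⟩)

theorem startswith_hyphen (c : Char) (rest : List Char) :
    PySem.Chars.startswith (c :: rest) ['-'] = (c == '-') := by
  rw [Bool.eq_iff_iff, PySem.Chars.startswith_iff]
  simp only [List.cons_prefix_cons, List.nil_prefix, and_true, beq_iff_eq]
  exact eq_comm

theorem endswith_hyphen (c : Char) (rest : List Char) :
    PySem.Chars.endswith (c :: rest) ['-'] = (rest.getLastD c == '-') := by
  induction rest generalizing c with
  | nil =>
    rw [Bool.eq_iff_iff, PySem.Chars.endswith_iff]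
    simp only [List.suffix_cons_iff, List.suffix_nil, beq_iff_eq, List.getLastD_nil]
    constructor
    · rintro (h | h)
      · exact (List.cons.injEq _ _ _ _ ▸ h).1.symm
      · exact absurd h (by simp)
    · intro h
      exact Or.inl (by rw [h])
  | cons b r ih =>
    rw [Bool.eq_iff_iff, PySem.Chars.endswith_iff, List.suffix_cons_iff]
    rw [← PySem.Chars.endswith_iff, ih]
    simp only [beq_iff_eq, List.getLastD_cons]
    constructor
    · rintro (h | h)
      · exact absurd (congrArg List.length h) (by simp)
      · exact h
    · exact Or.inr

theorem isIn_dd (c : Char) (rest : List Char) :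
    PySem.Chars.isIn ['-', '-'] (c :: rest) = !noDD (c :: rest) := by
  rw [Bool.eq_iff_iff, PySem.Chars.isIn_iff_infix]
  rw [Bool.not_eq_true', ← Bool.not_eq_true, noDD_iff]
  simp

theorem hyphenLoop_eq (l : List Char) : ∀ (prev : Char),
    hyphenLoop prev l =
      (l.all okChar && noDD (prev :: l) && (l.getLastD prev != '-')) := by
  induction l with
  | nil => intro prev; simp [hyphenLoop, noDD]
  | cons c rest ih =>
    intro prev
    simp only [hyphenLoop]
    rw [ih c]
    by_cases hv : (PySem.Chars.islower c || PySem.Chars.isdigit c || c == '-') = true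
    · by_cases hd : (c == '-' && prev == '-') = true
      · simp only [Bool.and_eq_true, beq_iff_eq] at hd
        simp [noDD, hd.1, hd.2]
      · have hok : okChar c = true := hv
        simp only [hv, Bool.not_true, hd]
        simp only [noDD, List.all_cons, hok, List.getLastD_cons, Bool.true_and]
        rw [Bool.and_comm (c == '-') (prev == '-')] at hd
        simp only [Bool.not_eq_true] at hd
        simp only [hd, Bool.not_false, Bool.true_and]
        ac_rfl
    · have hok : okChar c = false := by simpa [okChar] using hv
      simp only [Bool.not_eq_true] at hv
      simp [hv, hok]

-- ===== VERDICT (by name: the statement is the Claim_ definition above) =====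
theorem is_valid_hyphen_case_py_spec : Claim_equal_is_valid_hyphen_case_py := by
  intro name _
  unfold Spec_is_valid_hyphen_case_py is_valid_hyphen_case_py is_valid_hyphen_case_py_alt
  by_cases hempty : name == ""
  · simp [hempty]
  · simp only [hempty, Bool.false_eq_true, if_false]
    have hne : name ≠ "" := by simpa using hempty
    obtain ⟨c, rest, hcr⟩ : ∃ c rest, name.toList = c :: rest := by
      cases h : name.toList with
      | nil => exact absurd (String.toList_inj.mp (by simp [h])) hne
      | cons a b => exact ⟨a, b, rfl⟩
    simp only [PySem.Str.startswith_eq, PySem.Str.endswith_eq, PySem.Str.isIn_eq, hcr]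
    rw [show ("-" : String).toList = ['-'] from rfl,
        show ("--" : String).toList = ['-', '-'] from rfl,
        show (fun c => PySem.Chars.islower c || PySem.Chars.isdigit c || c == '-') = okChar from rfl,
        hyphenLoop_eq, startswith_hyphen, endswith_hyphen, isIn_dd]
    simp only [noDD, List.getLastD_cons, beq_self_eq_true, Bool.true_and]
    cases hc : c == '-' <;> cases hlast : rest.getLastD c == '-' <;> cases hn : noDD (c :: rest) <;>
      simp_all
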